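-- pv_equiv track=rewrite | github.com/mathsantosilva/MSS | BuscaMuro.py | limpar_string
-- ===== SOURCE A (Python) =====
-- def limpar_string(documento_inserido):
--     lista_limpa = []
--     lista_suja = documento_inserido.split(",")
--     for item in lista_suja:
--         sem_mascara = item.replace(".", "")
--         sem_mascara = sem_mascara.replace(",", "")
--         sem_mascara = sem_mascara.replace("-", "")
--         sem_mascara = sem_mascara.replace("/", "")
--         sem_mascara = sem_mascara.strip()
--         lista_limpa.append(sem_mascara)
--     return lista_limpa
-- ===== SOURCE B (Python) =====
-- def limpar_string(documento_inserido):
--     # Single left-to-right scan with an accumulator: fields are built character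
--     # by character (masks skipped, leading/trailing whitespace never committed),
--     # so no split/replace/strip passes are needed.
--     resultado = []
--     campo = []       # committed characters of the current field
--     pendente = []    # whitespace seen after the last committed character
--     for ch in documento_inserido:
--         if ch == ',':
--             resultado.append(''.join(campo))
--             campo = []
--             pendente = []
--         elif ch in './-':
--             pass
--         elif ch.isspace():
--             if campo:
--                 pendente.append(ch)
--         else:
--             campo += pendente
--             campo.append(ch)
--             pendente = []
--     resultado.append(''.join(campo))
--     return resultado
-- ===== Notes on version B (the rewrite author's own statement) =====
-- stated objective: alternative
-- what changed: B is a single left-to-right character scan with explicit accumulators (committed field chars, pending whitespace, finished fields) that builds each cleaned, stripped field on the fly, instead of A's split-on-comma followed by four per-item replace passes and a strip per item.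
import Mathlib
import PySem

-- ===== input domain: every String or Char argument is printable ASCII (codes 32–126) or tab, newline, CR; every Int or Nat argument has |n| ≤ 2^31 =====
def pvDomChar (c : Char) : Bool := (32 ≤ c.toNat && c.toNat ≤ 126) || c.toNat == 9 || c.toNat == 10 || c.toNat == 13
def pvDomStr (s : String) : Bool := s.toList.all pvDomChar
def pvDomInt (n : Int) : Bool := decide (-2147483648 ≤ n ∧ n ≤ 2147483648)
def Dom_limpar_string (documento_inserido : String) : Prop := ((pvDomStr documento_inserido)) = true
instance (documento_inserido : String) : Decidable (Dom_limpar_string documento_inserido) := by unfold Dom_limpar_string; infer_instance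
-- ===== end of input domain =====

-- B replaces A's split-then-per-item-replace/strip pipeline with a single left-to-right
-- character scan that builds each field in an accumulator (masks skipped, whitespace
-- committed only when a later non-space character arrives). Objective: alternative.

-- ===== PORT A =====
def limpar_string (documento_inserido : String) : List String :=
  let lista_limpa : List String := []
  -- documento_inserido.split(",")  (sep ≠ "", so Python's split returns normally)
  let lista_suja : List String :=
    (PySem.Chars.splitOn documento_inserido.toList [',']).map String.ofList
  lista_suja.foldl (fun lista_limpa item =>
    let sem_mascara := PySem.Str.replace item "." ""
    let sem_mascara := PySem.Str.replace sem_mascara "," ""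
    let sem_mascara := PySem.Str.replace sem_mascara "-" ""
    let sem_mascara := PySem.Str.replace sem_mascara "/" ""
    let sem_mascara := PySem.Str.strip sem_mascara
    lista_limpa ++ [sem_mascara]) lista_limpa

-- ===== PORT B =====
-- the scan loop of Source B: state = (campo: committed chars, pendente: pending whitespace,
-- resultado: finished fields); one step per input character, exactly Source B's branches
def pvScan : List Char → List Char → List Char → List String → List String
  | [], campo, _pendente, resultado => resultado ++ [String.ofList campo]
  | ch :: rest, campo, pendente, resultado =>
      if ch = ',' then
        pvScan rest [] [] (resultado ++ [String.ofList campo])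
      else if ch == '.' || ch == '-' || ch == '/' then        -- ch in './-'
        pvScan rest campo pendente resultado
      else if PySem.Chars.isspace ch then                     -- ch.isspace()
        if campo = [] then pvScan rest campo pendente resultado
        else pvScan rest campo (pendente ++ [ch]) resultado
      else
        pvScan rest (campo ++ pendente ++ [ch]) [] resultado

def limpar_string_alt (documento_inserido : String) : List String :=
  pvScan documento_inserido.toList [] [] []

-- ===== PRECONDITION & SPEC =====
def Spec_limpar_string (documento_inserido : String) (out : List String) : Prop := out = limpar_string_alt documento_inserido
instance (documento_inserido : String) (out : List String) : Decidable (Spec_limpar_string documento_inserido out) := by unfold Spec_limpar_string; infer_instance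

-- ===== CLAIM (what is proved, stated in full; the proofs are below) =====
def Claim_equal_limpar_string : Prop := ∀ (documento_inserido : String), Dom_limpar_string documento_inserido → Spec_limpar_string documento_inserido (limpar_string documento_inserido)

-- ===== LEMMAS AND PROOFS =====

-- fold "append one item" = map
theorem foldl_append_map {α β : Type} (f : α → β) (l : List α) (acc : List β) :
    l.foldl (fun acc x => acc ++ [f x]) acc = acc ++ l.map f := by
  induction l generalizing acc with
  | nil => simp
  | cons x t ih => simp [List.foldl, ih]

-- single-char replace-by-empty = filter
theorem replace_go_single (c : Char) (l acc : List Char) (fuel : Nat) (h : l.length ≤ fuel) :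
    PySem.Chars.replace.go [c] [] fuel l acc = acc.reverse ++ l.filter (fun x => !(x == c)) := by
  induction l generalizing acc fuel with
  | nil =>
    cases fuel <;> simp [PySem.Chars.replace.go]
  | cons x t ih =>
    cases fuel with
    | zero => simp at h
    | succ fuel =>
      rw [PySem.Chars.replace.go]
      have hpre : ([c].isPrefixOf (x :: t)) = (c == x) := by simp [List.isPrefixOf]
      by_cases hx : x = c
      · have hc : (c == x) = true := by simp [hx]
        simp only [hpre, hc, if_true, List.length_cons, List.length_nil,
          List.drop_succ_cons, List.drop_zero, List.reverse_nil, List.nil_append]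
        rw [ih acc fuel (by simp only [List.length_cons] at h; omega)]
        simp [hx]
      · have hc : (c == x) = false := beq_eq_false_iff_ne.mpr (fun h => hx h.symm)
        simp only [hpre, hc]
        rw [ih (x :: acc) fuel (by simp only [List.length_cons] at h; omega)]
        have hxc : (x == c) = false := by simpa using hx
        simp [hxc]

theorem replace_single (c : Char) (l : List Char) :
    PySem.Chars.replace l [c] [] = l.filter (fun x => !(x == c)) := by
  rw [PySem.Chars.replace]
  simpa using replace_go_single c l [] l.length le_rfl

-- pure accumulator form of splitOn on a single-character separator
def splitAcc (k : Char) : List Char → List Char → List (List Char)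
  | [], cur => [cur.reverse]
  | c :: rest, cur =>
      if c = k then cur.reverse :: splitAcc k rest [] else splitAcc k rest (c :: cur)

theorem splitOn_go_single (k : Char) (l cur : List Char) (acc : List (List Char)) (fuel : Nat)
    (h : l.length < fuel) :
    PySem.Chars.splitOn.go [k] fuel l cur acc = acc.reverse ++ splitAcc k l cur := by
  induction l generalizing cur acc fuel with
  | nil =>
    cases fuel with
    | zero => omega
    | succ fuel => simp [PySem.Chars.splitOn.go, splitAcc]
  | cons x t ih =>
    cases fuel with
    | zero => omega
    | succ fuel =>
      rw [PySem.Chars.splitOn.go]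
      have hpre : ([k].isPrefixOf (x :: t)) = (k == x) := by simp [List.isPrefixOf]
      by_cases hx : x = k
      · have hc : (k == x) = true := by simp [hx]
        simp only [hpre, hc, if_true, List.length_cons, List.length_nil,
          List.drop_succ_cons, List.drop_zero]
        rw [ih [] (cur.reverse :: acc) fuel (by simp only [List.length_cons] at h; omega)]
        simp [splitAcc, hx]
      · have hc : (k == x) = false := beq_eq_false_iff_ne.mpr (fun h => hx h.symm)
        simp only [hpre, hc]
        rw [ih (x :: cur) acc fuel (by simp only [List.length_cons] at h; omega)]
        simp [splitAcc, hx]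

theorem splitOn_single (k : Char) (l : List Char) :
    PySem.Chars.splitOn l [k] = splitAcc k l [] := by
  rw [PySem.Chars.splitOn]
  simpa using splitOn_go_single k l [] [] (l.length + 1) (by omega)

theorem splitAcc_ne_nil (k : Char) (l : List Char) : ∀ cur, splitAcc k l cur ≠ [] := by
  induction l with
  | nil => intro cur; simp [splitAcc]
  | cons c rest ih =>
    intro cur
    rw [splitAcc]
    split
    · simp
    · exact ih _

-- splitting with a non-empty current accumulator only extends the first piece
theorem splitAcc_shift (k : Char) (l cur h : List Char) (t : List (List Char))
    (hl : splitAcc k l [] = h :: t) :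
    splitAcc k l cur = (cur.reverse ++ h) :: t := by
  induction l generalizing cur h t with
  | nil =>
    simp [splitAcc] at hl ⊢
    obtain ⟨rfl, rfl⟩ := hl
    simp
  | cons c rest ih =>
    by_cases hc : c = k
    · simp [splitAcc, hc] at hl ⊢
      obtain ⟨rfl, rfl⟩ := hl
      simp
    · simp only [splitAcc, if_neg hc] at hl ⊢
      obtain ⟨h', t', hrest⟩ : ∃ h' t', splitAcc k rest [] = h' :: t' := by
        cases hr : splitAcc k rest [] with
        | nil => exact absurd hr (splitAcc_ne_nil k rest [])
        | cons a b => exact ⟨a, b, rfl⟩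
      rw [ih [c] h' t' hrest] at hl
      injection hl with e1 e2
      subst e1; subst e2
      rw [ih (c :: cur) h' t' hrest]
      simp

-- no piece produced by splitAcc contains the separator
theorem splitAcc_no_sep (k : Char) (l cur : List Char) (hcur : ∀ x ∈ cur, x ≠ k) :
    ∀ piece ∈ splitAcc k l cur, ∀ x ∈ piece, x ≠ k := by
  induction l generalizing cur with
  | nil =>
    intro piece hp x hx
    simp [splitAcc] at hp
    subst hp
    exact hcur x (by simpa using hx)
  | cons c t ih =>
    intro piece hp x hx
    by_cases hc : c = k
    · simp [splitAcc, hc] at hp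
      rcases hp with hp | hp
      · subst hp; exact hcur x (by simpa using hx)
      · exact ih [] (by simp) piece hp x hx
    · simp [splitAcc, hc] at hp
      refine ih (c :: cur) ?_ piece hp x hx
      intro y hy
      rcases List.mem_cons.mp hy with h | h
      · simpa [h] using hc
      · exact hcur y h

-- the per-piece value pvScan computes, as a pure function of the cleaned piece
def pvFinish : List Char → List Char → List Char → List Char
  | campo, _pend, [] => campo
  | campo, pend, c :: v =>
      if PySem.Chars.isspace c then
        if campo = [] then pvFinish campo pend v else pvFinish campo (pend ++ [c]) v
      else pvFinish (campo ++ pend ++ [c]) [] v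

def pvClean (l : List Char) : List Char :=
  l.filter (fun c => !(c == '.' || c == '-' || c == '/'))

-- dropWhile stops no later than the first element failing the predicate
theorem dropWhile_append_cons {p : Char → Bool} (a : List Char) (c : Char) (b : List Char)
    (hc : p c = false) :
    List.dropWhile p (a ++ c :: b) = List.dropWhile p a ++ c :: b := by
  induction a with
  | nil => simp [hc]
  | cons x a ih =>
    by_cases hx : p x = true
    · simp [hx, ih]
    · simp [hx]

-- with a committed non-empty field, finishing = append the right-stripped remainder
theorem pvFinish_ne (v : List Char) : ∀ campo pend, campo ≠ [] →
    (∀ x ∈ pend, PySem.Chars.isspace x = true) →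
    pvFinish campo pend v =
      campo ++ ((pend ++ v).reverse.dropWhile PySem.Chars.isspace).reverse := by
  induction v with
  | nil =>
    intro campo pend hcampo hpend
    have : pend.reverse.dropWhile PySem.Chars.isspace = [] := by
      rw [List.dropWhile_eq_nil_iff]
      intro x hx; exact hpend x (by simpa using hx)
    simp [pvFinish, this]
  | cons c v ih =>
    intro campo pend hcampo hpend
    by_cases hws : PySem.Chars.isspace c = true
    · rw [pvFinish, if_pos hws, if_neg hcampo,
        ih campo (pend ++ [c]) hcampo (by intro x hx; rcases List.mem_append.mp hx with h | h
                                          · exact hpend x h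
                                          · simpa [List.mem_singleton.mp h] using hws)]
      simp
    · rw [pvFinish, if_neg hws, ih (campo ++ pend ++ [c]) [] (by simp) (by simp)]
      rw [show (pend ++ c :: v).reverse = v.reverse ++ c :: pend.reverse by simp,
        dropWhile_append_cons _ _ _ (by simpa using hws)]
      simp

-- from the empty state, finishing = Python strip
theorem pvFinish_nil_eq_strip (v : List Char) :
    pvFinish [] [] v = PySem.Chars.strip v := by
  have hstrip : ∀ w : List Char, PySem.Chars.strip w =
      ((w.dropWhile PySem.Chars.isspace).reverse.dropWhile PySem.Chars.isspace).reverse := by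
    intro w; simp [PySem.Chars.strip, PySem.Chars.lstrip, PySem.Chars.rstrip]
  induction v with
  | nil => simp [pvFinish, hstrip]
  | cons c v ih =>
    by_cases hws : PySem.Chars.isspace c = true
    · rw [pvFinish, if_pos hws, if_pos rfl, ih, hstrip, hstrip,
        List.dropWhile_cons, if_pos hws]
    · rw [pvFinish, if_neg hws]
      simp only [List.nil_append]
      rw [pvFinish_ne v [c] [] (by simp) (by simp), hstrip,
        List.dropWhile_cons, if_neg hws]
      rw [show (c :: v).reverse = v.reverse ++ c :: ([] : List Char).reverse by simp,
        dropWhile_append_cons _ _ _ (by simpa using hws)]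
      simp

-- the scan computes, per piece of the comma-split, pvFinish of the cleaned piece
theorem pvScan_eq (l : List Char) : ∀ campo pend res h t,
    splitAcc ',' l [] = h :: t →
    pvScan l campo pend res =
      res ++ String.ofList (pvFinish campo pend (pvClean h))
        :: t.map (fun p => String.ofList (pvFinish [] [] (pvClean p))) := by
  induction l with
  | nil =>
    intro campo pend res h t hl
    simp [splitAcc] at hl
    obtain ⟨rfl, rfl⟩ := hl
    simp [pvScan, pvClean, pvFinish]
  | cons c rest ih =>
    intro campo pend res h t hl
    obtain ⟨h', t', hrest⟩ : ∃ h' t', splitAcc ',' rest [] = h' :: t' := by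
      cases hr : splitAcc ',' rest [] with
      | nil => exact absurd hr (splitAcc_ne_nil ',' rest [])
      | cons a b => exact ⟨a, b, rfl⟩
    by_cases hc : c = ','
    · simp [splitAcc, hc, hrest] at hl
      obtain ⟨rfl, rfl⟩ := hl
      rw [pvScan, if_pos hc, ih [] [] _ h' t' hrest]
      simp [pvClean, pvFinish]
    · have hshift := splitAcc_shift ',' rest [c] h' t' hrest
      simp only [splitAcc, if_neg hc, hshift, List.reverse_cons, List.reverse_nil,
        List.nil_append, List.singleton_append] at hl
      injection hl with e1 e2
      subst e1; subst e2
      by_cases hm : (c == '.' || c == '-' || c == '/') = true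
      · rw [pvScan, if_neg hc, if_pos hm, ih campo pend res h' t' hrest]
        have : pvClean (c :: h') = pvClean h' := by
          rw [pvClean, pvClean, List.filter_cons, if_neg (by simp [hm])]
        rw [this]
      · have hcl : pvClean (c :: h') = c :: pvClean h' := by
          rw [pvClean, pvClean, List.filter_cons, if_pos (by simpa using hm)]
        by_cases hws : PySem.Chars.isspace c = true
        · by_cases hcampo : campo = []
          · rw [pvScan, if_neg hc, if_neg hm, if_pos hws, if_pos hcampo,
              ih campo pend res h' t' hrest, hcl]
            rw [pvFinish, if_pos hws, if_pos hcampo]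
          · rw [pvScan, if_neg hc, if_neg hm, if_pos hws, if_neg hcampo,
              ih campo (pend ++ [c]) res h' t' hrest, hcl]
            rw [pvFinish, if_pos hws, if_neg hcampo]
        · rw [pvScan, if_neg hc, if_neg hm, if_neg hws,
            ih (campo ++ pend ++ [c]) [] res h' t' hrest, hcl]
          rw [pvFinish, if_neg hws]

-- ===== VERDICT (by name: the statement is the Claim_ definition above) =====
theorem limpar_string_spec : Claim_equal_limpar_string := by
  intro s _
  show limpar_string s = limpar_string_alt s
  unfold limpar_string limpar_string_alt
  simp only [foldl_append_map, List.nil_append, List.map_map, splitOn_single]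
  obtain ⟨h, t, hsplit⟩ : ∃ h t, splitAcc ',' s.toList [] = h :: t := by
    cases hr : splitAcc ',' s.toList [] with
    | nil => exact absurd hr (splitAcc_ne_nil ',' s.toList [])
    | cons a b => exact ⟨a, b, rfl⟩
  rw [pvScan_eq s.toList [] [] [] h t hsplit, hsplit, List.nil_append,
    show (String.ofList (pvFinish [] [] (pvClean h))
        :: t.map fun p => String.ofList (pvFinish [] [] (pvClean p)))
      = (h :: t).map (fun p => String.ofList (pvFinish [] [] (pvClean p))) from rfl,
    ← hsplit]
  apply List.map_congr_left
  intro piece hpiece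
  have hnosep : ∀ x ∈ piece, x ≠ ',' :=
    splitAcc_no_sep ',' s.toList [] (by simp) piece hpiece
  simp only [Function.comp]
  apply String.toList_injective
  simp only [PySem.Str.toList_strip, PySem.Str.toList_replace, String.toList_ofList]
  have h1 : ("." : String).toList = ['.'] := by decide
  have h2 : ("," : String).toList = [','] := by decide
  have h3 : ("-" : String).toList = ['-'] := by decide
  have h4 : ("/" : String).toList = ['/'] := by decide
  have h0 : ("" : String).toList = [] := by decide
  rw [h1, h2, h3, h4, h0, replace_single, replace_single, replace_single, replace_single,
    pvFinish_nil_eq_strip]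
  congr 1
  rw [pvClean, List.filter_filter, List.filter_filter, List.filter_filter]
  apply List.filter_congr
  intro x hx
  have hne : (x == ',') = false := by simpa using hnosep x hx
  simp [hne]; ac_rfl
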